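-- pv_equiv track=rewrite | github.com/ramonfilho/smartads | comparison_script.py | categorize_columns
-- ===== SOURCE A (Python) =====
-- def categorize_columns(column_set):
--     """
--     Categoriza colunas baseado em padrões comuns.
--
--     Args:
--         column_set: Conjunto de nomes de colunas
--
--     Returns:
--         Dict com categorias e suas colunas
--     """
--     categories = {
--         'tfidf': set(),
--         'sentiment': set(),
--         'commitment': set(),
--         'career': set(),
--         'aspiration': set(),
--         'motivation': set(),
--         'temporal': set(),
--         'original_text': set(),
--         'other': set()
--     }
--
--     for col in column_set:
--         col_lower = col.lower()
--         if 'tfidf' in col_lower: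
--             categories['tfidf'].add(col)
--         elif any(term in col_lower for term in ['sentiment', 'pos', 'neg', 'compound']):
--             categories['sentiment'].add(col)
--         elif any(term in col_lower for term in ['commitment', 'has_commitment']):
--             categories['commitment'].add(col)
--         elif any(term in col_lower for term in ['career', 'professional']):
--             categories['career'].add(col)
--         elif 'aspiration' in col_lower:
--             categories['aspiration'].add(col)
--         elif 'motivation' in col_lower:
--             categories['motivation'].add(col)
--         elif any(term in col_lower for term in ['hour', 'day', 'time', 'date']):
--             categories['temporal'].add(col)
--         elif 'original' in col_lower:
--             categories['original_text'].add(col)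
--         else:
--             categories['other'].add(col)
--
--     # Remover categorias vazias
--     return {k: v for k, v in categories.items() if v}
-- ===== SOURCE B (Python) =====
-- RULES = [
--     ('tfidf', ['tfidf']),
--     ('sentiment', ['sentiment', 'pos', 'neg', 'compound']),
--     ('commitment', ['commitment', 'has_commitment']),
--     ('career', ['career', 'professional']),
--     ('aspiration', ['aspiration']),
--     ('motivation', ['motivation']),
--     ('temporal', ['hour', 'day', 'time', 'date']),
--     ('original_text', ['original']),
-- ]
--
--
-- def categorize_columns(column_set):
--     """Sieve: for each category in priority order, peel its matches off a
--     shrinking pool of still-unclassified columns; the leftover pool is 'other'."""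
--     result = {}
--     remaining = list(column_set)
--     for name, terms in RULES:
--         matched = [c for c in remaining if any(t in c.lower() for t in terms)]
--         remaining = [c for c in remaining if not any(t in c.lower() for t in terms)]
--         if matched:
--             result[name] = set(matched)
--     if remaining:
--         result['other'] = set(remaining)
--     return result
-- ===== Notes on version B (the rewrite author's own statement) =====
-- stated objective: alternative
-- what changed: A loops over the columns and runs an if/elif chain per column; B is a sieve that loops over the categories, peeling each category's matches off a shrinking pool of unclassified columns per pass, the leftover pool becoming 'other'.
import Mathlib
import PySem

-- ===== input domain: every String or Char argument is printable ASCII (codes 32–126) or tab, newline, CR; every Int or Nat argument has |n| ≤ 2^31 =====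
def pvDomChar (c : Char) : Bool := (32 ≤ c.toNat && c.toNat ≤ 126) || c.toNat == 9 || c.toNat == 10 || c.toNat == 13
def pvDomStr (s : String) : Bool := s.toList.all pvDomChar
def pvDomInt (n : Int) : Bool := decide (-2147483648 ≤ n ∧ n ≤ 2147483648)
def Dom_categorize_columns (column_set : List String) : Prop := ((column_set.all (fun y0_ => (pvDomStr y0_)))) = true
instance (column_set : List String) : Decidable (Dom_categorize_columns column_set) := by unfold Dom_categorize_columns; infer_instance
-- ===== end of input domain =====

-- B replaces A's per-column if/elif chain by a sieve over the categories: each category's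
-- matches are peeled off a shrinking pool of unclassified columns (objective: alternative, same cost).
-- Equivalence is about the RETURN value; neither program mutates its argument.

-- ===== PORT A =====
-- one step of A's 'for col in column_set' loop (the if/elif chain; col_lower inlined, same value)
def pvAStep (d : PySem.Dict String (List String)) (col : String) : PySem.Dict String (List String) :=
  if PySem.Str.isIn "tfidf" (PySem.Str.lower col) then
    d.modify "tfidf" [] (fun s => PySem.Set.add s col)
  else if ["sentiment", "pos", "neg", "compound"].any (fun t => PySem.Str.isIn t (PySem.Str.lower col)) then
    d.modify "sentiment" [] (fun s => PySem.Set.add s col)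
  else if ["commitment", "has_commitment"].any (fun t => PySem.Str.isIn t (PySem.Str.lower col)) then
    d.modify "commitment" [] (fun s => PySem.Set.add s col)
  else if ["career", "professional"].any (fun t => PySem.Str.isIn t (PySem.Str.lower col)) then
    d.modify "career" [] (fun s => PySem.Set.add s col)
  else if PySem.Str.isIn "aspiration" (PySem.Str.lower col) then
    d.modify "aspiration" [] (fun s => PySem.Set.add s col)
  else if PySem.Str.isIn "motivation" (PySem.Str.lower col) then
    d.modify "motivation" [] (fun s => PySem.Set.add s col)
  else if ["hour", "day", "time", "date"].any (fun t => PySem.Str.isIn t (PySem.Str.lower col)) then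
    d.modify "temporal" [] (fun s => PySem.Set.add s col)
  else if PySem.Str.isIn "original" (PySem.Str.lower col) then
    d.modify "original_text" [] (fun s => PySem.Set.add s col)
  else
    d.modify "other" [] (fun s => PySem.Set.add s col)

def categorize_columns (column_set : List String) : List (String × List String) :=
  let categories : PySem.Dict String (List String) :=
    PySem.Dict.mk [("tfidf", []), ("sentiment", []), ("commitment", []), ("career", []),
                   ("aspiration", []), ("motivation", []), ("temporal", []),
                   ("original_text", []), ("other", [])]
  let categories := column_set.foldl pvAStep categories
  -- {k: v for k, v in categories.items() if v}
  (categories.items.foldl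
    (fun out kv => if !kv.2.isEmpty then out.insert kv.1 kv.2 else out)
    PySem.Dict.empty).items

-- ===== PORT B =====
def pvRules : List (String × List String) :=
  [("tfidf", ["tfidf"]),
   ("sentiment", ["sentiment", "pos", "neg", "compound"]),
   ("commitment", ["commitment", "has_commitment"]),
   ("career", ["career", "professional"]),
   ("aspiration", ["aspiration"]),
   ("motivation", ["motivation"]),
   ("temporal", ["hour", "day", "time", "date"]),
   ("original_text", ["original"])]

-- any(t in c.lower() for t in terms)
def pvMatches (terms : List String) (col : String) : Bool :=
  terms.any (fun t => PySem.Str.isIn t (PySem.Str.lower col))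

-- the 'for name, terms in RULES' sieve loop: state = (result dict, remaining pool)
def pvSieve : List (String × List String) → PySem.Dict String (List String) → List String →
    PySem.Dict String (List String) × List String
  | [], result, remaining => (result, remaining)
  | (name, terms) :: rest, result, remaining =>
      let matched := remaining.filter (pvMatches terms)
      let remaining' := remaining.filter (fun c => !pvMatches terms c)
      let result' := if !matched.isEmpty then result.insert name (PySem.Set.ofList matched) else result
      pvSieve rest result' remaining'

def categorize_columns_alt (column_set : List String) : List (String × List String) :=
  let st := pvSieve pvRules PySem.Dict.empty column_set
  let result := if !st.2.isEmpty then st.1.insert "other" (PySem.Set.ofList st.2) else st.1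
  result.items

-- ===== PRECONDITION & SPEC =====
def Spec_categorize_columns (column_set : List String) (out : List (String × List String)) : Prop := out = categorize_columns_alt column_set
instance (column_set : List String) (out : List (String × List String)) : Decidable (Spec_categorize_columns column_set out) := by unfold Spec_categorize_columns; infer_instance

-- ===== CLAIM (what is proved, stated in full; the proofs are below) =====
def Claim_equal_categorize_columns : Prop := ∀ (column_set : List String), Dom_categorize_columns column_set → Spec_categorize_columns column_set (categorize_columns column_set)

-- ===== LEMMAS AND PROOFS =====

-- classification as A's chain computes it: first rule whose terms match, else "other"
def pvFindCat : List (String × List String) → String → String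
  | [], _ => "other"
  | (name, terms) :: rest, col => if pvMatches terms col then name else pvFindCat rest col

def pvClassify (col : String) : String := pvFindCat pvRules col

def pvOrder : List String := pvRules.map Prod.fst ++ ["other"]

-- A's if/elif chain picks exactly the category pvClassify picks
theorem pvAStep_eq (d : PySem.Dict String (List String)) (col : String) :
    pvAStep d col = d.modify (pvClassify col) [] (fun s => PySem.Set.add s col) := by
  simp only [pvAStep, pvClassify, pvFindCat, pvMatches, pvRules, List.any_cons, List.any_nil,
    Bool.or_false]
  split_ifs <;> rfl

theorem pvClassify_mem_order (col : String) : pvClassify col ∈ pvOrder := by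
  simp only [pvClassify, pvFindCat, pvMatches, pvRules]
  split_ifs <;> decide

theorem pvFindCat_mem (R : List (String × List String)) (col : String) :
    pvFindCat R col ∈ "other" :: R.map Prod.fst := by
  induction R with
  | nil => simp [pvFindCat]
  | cons p rest ih =>
    obtain ⟨name, terms⟩ := p
    simp only [pvFindCat]
    split_ifs with h
    · simp
    · rcases List.mem_cons.mp ih with h' | h'
      · simp [h']
      · simp [h']

theorem fold_modify_getD (key : String → String) (l : List String)
    (d : PySem.Dict String (List String)) (c : String) :
    (l.foldl (fun d x => d.modify (key x) [] (fun s => PySem.Set.add s x)) d).getD c [] =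
    (l.filter (fun x => key x == c)).foldl PySem.Set.add (d.getD c []) := by
  induction l generalizing d with
  | nil => rfl
  | cons x t ih =>
    simp only [List.foldl_cons, List.filter_cons, ih]
    rw [PySem.Dict.getD_modify]
    by_cases h : key x = c
    · simp [h]
    · simp [h, Ne.symm h, beq_iff_eq]

theorem fold_modify_keys (key : String → String) (l : List String)
    (d : PySem.Dict String (List String)) (h : ∀ x ∈ l, key x ∈ d.keys) :
    (l.foldl (fun d x => d.modify (key x) [] (fun s => PySem.Set.add s x)) d).keys = d.keys := by
  rw [PySem.Dict.keys_foldl_modify_key]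
  rw [PySem.Set.update_eq_append_filter]
  have : (PySem.Set.ofList (l.map key)).filter (fun y => !(PySem.Set.contains d.keys y)) = [] := by
    apply List.filter_eq_nil_iff.mpr
    intro y hy
    have := (PySem.Set.mem_ofList _ _).mp hy
    simp only [List.mem_map] at this
    obtain ⟨x, hx, rfl⟩ := this
    simp [h x hx]
  rw [this]
  simp

-- a dict with Nodup keys is determined by keys and getD
theorem items_eq_keys_map (l : List (String × List String)) (h : (l.map Prod.fst).Nodup) :
    l = (l.map Prod.fst).map (fun k => (k, (PySem.Dict.mk l).getD k [])) := by
  induction l with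
  | nil => rfl
  | cons p t ih =>
    obtain ⟨k, v⟩ := p
    simp only [List.map_cons, List.nodup_cons] at h ⊢
    have hhead : (PySem.Dict.mk ((k, v) :: t)).getD k [] = v := by
      simp [PySem.Dict.getD, PySem.Dict.get?_mk_cons]
    rw [hhead]
    congr 1
    have ht := ih h.2
    conv_lhs => rw [ht]
    apply List.map_congr_left
    intro x hx
    have hxk : ¬ (k == x) := by
      simp only [beq_iff_eq]
      rintro rfl
      exact h.1 hx
    simp [PySem.Dict.getD, PySem.Dict.get?_mk_cons, hxk]

theorem ofList_isEmpty (l : List String) : (PySem.Set.ofList l).isEmpty = l.isEmpty := by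
  cases l with
  | nil => rfl
  | cons x t =>
    have hne : PySem.Set.ofList (x :: t) ≠ [] := by
      intro hcon
      have hmem := (PySem.Set.mem_ofList (x :: t) x).mpr (List.mem_cons_self)
      rw [hcon] at hmem
      exact absurd hmem List.not_mem_nil
    simp [hne]

-- the sieve, characterized by first-match classification over the full rule list
theorem sieve_eq (R : List (String × List String)) (rem : List String)
    (res : PySem.Dict String (List String))
    (hnd : ("other" :: R.map Prod.fst).Nodup) :
    pvSieve R res rem =
      (R.foldl (fun out rule =>
          let m := rem.filter (fun x => pvFindCat R x == rule.1)
          if !m.isEmpty then out.insert rule.1 (PySem.Set.ofList m) else out) res,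
       rem.filter (fun x => pvFindCat R x == "other")) := by
  induction R generalizing rem res with
  | nil => simp [pvSieve, pvFindCat]
  | cons p rest ih =>
    obtain ⟨name, terms⟩ := p
    have hnd' : ("other" :: rest.map Prod.fst).Nodup := by
      simp only [List.map_cons, List.nodup_cons] at hnd ⊢
      exact ⟨fun h => hnd.1 (List.mem_cons_of_mem _ h), hnd.2.2⟩
    have hother_ne : name ≠ "other" := by
      simp only [List.map_cons, List.nodup_cons, List.mem_cons] at hnd
      exact fun h => hnd.1 (Or.inl h.symm)
    have hname_notin : name ∉ rest.map Prod.fst := by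
      simp only [List.map_cons, List.nodup_cons] at hnd
      exact hnd.2.1
    -- not matched by the head rule ⇒ classification by full list = classification by rest
    have hstepN : ∀ x, pvFindCat ((name, terms) :: rest) x =
        if pvMatches terms x then name else pvFindCat rest x := fun _ => rfl
    simp only [pvSieve]
    rw [ih _ _ hnd']
    rw [Prod.mk.injEq]
    constructor
    · -- dict component
      simp only [List.foldl_cons]
      -- head rule's filter = pvMatches filter
      have hhead : rem.filter (fun x => pvFindCat ((name, terms) :: rest) x == name)
          = rem.filter (pvMatches terms) := by
        apply List.filter_congr
        intro x _
        rw [hstepN]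
        by_cases h : pvMatches terms x
        · simp [h]
        · simp only [h, if_false, Bool.false_eq_true]
          have := pvFindCat_mem rest x
          rcases List.mem_cons.mp this with h' | h'
          · simp [h', Ne.symm hother_ne]
          · have : pvFindCat rest x ≠ name := fun hc => hname_notin (hc ▸ h')
            simp [this]
      rw [hhead]
      apply PySem.List.foldl_congr_mem
      intro out rule hrule
      have hne1 : rule.1 ≠ name := fun hc => hname_notin (hc ▸ List.mem_map_of_mem hrule)
      have hfilt : rem.filter (fun x => pvFindCat ((name, terms) :: rest) x == rule.1)
          = (rem.filter (fun c => !pvMatches terms c)).filter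
              (fun x => pvFindCat rest x == rule.1) := by
        rw [List.filter_filter]
        apply List.filter_congr
        intro x _
        rw [hstepN]
        by_cases h : pvMatches terms x
        · simp only [h, if_true]
          have : ¬ name = rule.1 := fun hc => hne1 hc.symm
          simp [this]
        · simp [h]
      rw [hfilt]
    · -- remaining component
      rw [List.filter_filter]
      apply List.filter_congr
      intro x _
      rw [hstepN]
      by_cases h : pvMatches terms x
      · simp [h, hother_ne]
      · simp [h]

-- ===== VERDICT (by name: the statement is the Claim_ definition above) =====
theorem categorize_columns_spec : Claim_equal_categorize_columns := by
  intro cols _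
  unfold Spec_categorize_columns
  unfold categorize_columns categorize_columns_alt
  simp only []
  set F : String → List String :=
    fun k => PySem.Set.ofList (cols.filter (fun x => pvClassify x == k)) with hF
  -- A's loop = classified modify-loop
  have hfold : cols.foldl pvAStep
      (PySem.Dict.mk [("tfidf", []), ("sentiment", []), ("commitment", []), ("career", []),
        ("aspiration", []), ("motivation", []), ("temporal", []), ("original_text", []), ("other", [])])
      = cols.foldl (fun d x => d.modify (pvClassify x) [] (fun s => PySem.Set.add s x))
        (PySem.Dict.mk [("tfidf", []), ("sentiment", []), ("commitment", []), ("career", []),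
        ("aspiration", []), ("motivation", []), ("temporal", []), ("original_text", []), ("other", [])]) := by
    apply PySem.List.foldl_congr_mem
    intro d x _
    exact pvAStep_eq d x
  rw [hfold]
  set d0 : PySem.Dict String (List String) :=
    PySem.Dict.mk [("tfidf", []), ("sentiment", []), ("commitment", []), ("career", []),
      ("aspiration", []), ("motivation", []), ("temporal", []), ("original_text", []), ("other", [])] with hd0
  set dfin := cols.foldl (fun d x => d.modify (pvClassify x) [] (fun s => PySem.Set.add s x)) d0 with hdfin
  -- characterize A's final dict items
  have hkeys : dfin.keys = pvOrder := by
    rw [hdfin, fold_modify_keys]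
    · decide
    · intro x _
      have := pvClassify_mem_order x
      revert this
      have : d0.keys = pvOrder := by decide
      rw [this]
      exact id
  have hgetD : ∀ c, dfin.getD c [] = F c := by
    intro c
    rw [hdfin, fold_modify_getD]
    have hz : d0.getD c [] = [] := by
      simp only [hd0, PySem.Dict.getD, PySem.Dict.get?_mk_cons]
      split_ifs <;> rfl
    rw [hz, hF]
    rfl
  have hitems : dfin.items = pvOrder.map (fun k => (k, F k)) := by
    have h1 : dfin.items = (dfin.items.map Prod.fst).map
        (fun k => (k, (PySem.Dict.mk dfin.items).getD k [])) := by
      apply items_eq_keys_map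
      have : dfin.items.map Prod.fst = dfin.keys := rfl
      rw [this, hkeys]
      decide
    have h2 : dfin.items.map Prod.fst = pvOrder := hkeys
    rw [h1, h2]
    apply List.map_congr_left
    intro k _
    have : PySem.Dict.mk dfin.items = dfin := rfl
    rw [this, hgetD]
  rw [hitems]
  -- A side: fold over the item pairs = fold over the keys, names first, then "other"
  rw [List.foldl_map]
  unfold pvOrder
  rw [List.foldl_append]
  -- B side: evaluate the sieve
  rw [sieve_eq pvRules cols PySem.Dict.empty (by decide)]
  simp only [List.foldl_cons, List.foldl_nil]
  -- identify conditions and inserted values on both sides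
  have hFfilt : ∀ k, F k = PySem.Set.ofList (cols.filter (fun x => pvFindCat pvRules x == k)) := by
    intro k; rw [hF]; rfl
  have hcondF : ∀ k, (F k).isEmpty = (cols.filter (fun x => pvFindCat pvRules x == k)).isEmpty := by
    intro k; rw [hFfilt, ofList_isEmpty]
  have hsieve_fold : (pvRules.foldl (fun out rule =>
          let m := cols.filter (fun x => pvFindCat pvRules x == rule.1)
          if !m.isEmpty then out.insert rule.1 (PySem.Set.ofList m) else out) PySem.Dict.empty)
        = ((pvRules.map Prod.fst).foldl (fun out k =>
            if !(F k).isEmpty then out.insert k (F k) else out) PySem.Dict.empty) := by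
    rw [List.foldl_map]
    apply PySem.List.foldl_congr_mem
    intro out rule _
    simp only [hFfilt, ofList_isEmpty]
  rw [hsieve_fold, List.foldl_map]
  simp only [hFfilt, ofList_isEmpty]
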